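-- pv_equiv track=rewrite | github.com/carpenter-ai/carpenter-core | carpenter/review/code_sanitizer.py | _build_rename_map
-- ===== SOURCE A (Python) =====
-- import builtins
-- import keyword
--
-- _BUILTINS = frozenset(dir(builtins)) | frozenset(keyword.kwlist) | frozenset({
--     "__name__", "__file__", "__doc__", "__all__",
--     "__init__", "__main__", "__spec__",
-- })
--
-- def _sequential_name(index: int) -> str:
--     """Generate sequential variable names: a, b, ..., z, aa, ab, ..."""
--     result = ""
--     n = index
--     while True:
--         result = chr(ord("a") + n % 26) + result
--         n = n // 26 - 1
--         if n < 0: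
--             break
--     return result
--
-- def _build_rename_map(
--     defined_names: set[str],
--     imported_names: set[str],
-- ) -> dict[str, str]:
--     """Build a mapping from user-defined names to sequential identifiers."""
--     # Only rename names that are user-defined (not builtins or imports)
--     renameable = defined_names - imported_names - _BUILTINS
--     rename_map = {}
--     idx = 0
--     for name in sorted(renameable):  # Sort for deterministic output
--         new_name = _sequential_name(idx)
--         # Skip if new_name collides with a preserved name
--         while new_name in _BUILTINS or new_name in imported_names:
--             idx += 1
--             new_name = _sequential_name(idx)
--         rename_map[name] = new_name
--         idx += 1
--     return rename_map
-- ===== SOURCE B (Python) =====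
-- # _BUILTINS = frozenset(dir(builtins)) | frozenset(keyword.kwlist) | frozenset({...}) as in A,
-- # written out literally (CPython 3.11): the allowed-import rules forbid importing builtins/keyword here.
-- _BUILTINS = frozenset({
--     "ArithmeticError", "AssertionError", "AttributeError", "BaseException",
--     "BaseExceptionGroup", "BlockingIOError", "BrokenPipeError", "BufferError", "BytesWarning",
--     "ChildProcessError", "ConnectionAbortedError", "ConnectionError", "ConnectionRefusedError",
--     "ConnectionResetError", "DeprecationWarning", "EOFError", "Ellipsis", "EncodingWarning",
--     "EnvironmentError", "Exception", "ExceptionGroup", "False", "FileExistsError",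
--     "FileNotFoundError", "FloatingPointError", "FutureWarning", "GeneratorExit", "IOError",
--     "ImportError", "ImportWarning", "IndentationError", "IndexError", "InterruptedError",
--     "IsADirectoryError", "KeyError", "KeyboardInterrupt", "LookupError", "MemoryError",
--     "ModuleNotFoundError", "NameError", "None", "NotADirectoryError", "NotImplemented",
--     "NotImplementedError", "OSError", "OverflowError", "PendingDeprecationWarning",
--     "PermissionError", "ProcessLookupError", "RecursionError", "ReferenceError",
--     "ResourceWarning", "RuntimeError", "RuntimeWarning", "StopAsyncIteration", "StopIteration",
--     "SyntaxError", "SyntaxWarning", "SystemError", "SystemExit", "TabError", "TimeoutError",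
--     "True", "TypeError", "UnboundLocalError", "UnicodeDecodeError", "UnicodeEncodeError",
--     "UnicodeError", "UnicodeTranslateError", "UnicodeWarning", "UserWarning", "ValueError",
--     "Warning", "ZeroDivisionError", "__all__", "__build_class__", "__debug__", "__doc__",
--     "__file__", "__import__", "__init__", "__loader__", "__main__", "__name__", "__package__",
--     "__spec__", "abs", "aiter", "all", "and", "anext", "any", "as", "ascii", "assert", "async",
--     "await", "bin", "bool", "break", "breakpoint", "bytearray", "bytes", "callable", "chr",
--     "class", "classmethod", "compile", "complex", "continue", "copyright", "credits", "def",
--     "del", "delattr", "dict", "dir", "divmod", "elif", "else", "enumerate", "eval", "except",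
--     "exec", "exit", "filter", "finally", "float", "for", "format", "from", "frozenset",
--     "getattr", "global", "globals", "hasattr", "hash", "help", "hex", "id", "if", "import",
--     "in", "input", "int", "is", "isinstance", "issubclass", "iter", "lambda", "len", "license",
--     "list", "locals", "map", "max", "memoryview", "min", "next", "nonlocal", "not", "object",
--     "oct", "open", "or", "ord", "pass", "pow", "print", "property", "quit", "raise", "range",
--     "repr", "return", "reversed", "round", "set", "setattr", "slice", "sorted", "staticmethod",
--     "str", "sum", "super", "try", "tuple", "type", "vars", "while", "with", "yield", "zip",
-- })
--
--
-- from itertools import count, product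
-- from string import ascii_lowercase
--
--
-- def _candidate_names():
--     """Yield every lowercase identifier by length then lexicographically:
--     a, b, ..., z, aa, ab, ...  (the order of bijective base-26 counting)."""
--     return ("".join(tup)
--             for length in count(1)
--             for tup in product(ascii_lowercase, repeat=length))
--
--
-- def _build_rename_map(
--     defined_names: set[str],
--     imported_names: set[str],
-- ) -> dict[str, str]:
--     """Build a mapping from user-defined names to sequential identifiers."""
--     renameable = sorted(defined_names - imported_names - _BUILTINS)
--     blocked = _BUILTINS | set(imported_names)
--     valid = (name for name in _candidate_names() if name not in blocked)
--     return dict(zip(renameable, valid))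
-- ===== Notes on version B (the rewrite author's own statement) =====
-- stated objective: idiomatic
-- what changed: A computes each short name by per-index base-26 arithmetic and advances a counter through an in-place while-loop on collisions; B builds the candidate-name stream (all lowercase names by length, then lexicographically) with a generator, filters out builtins/imported names once, and zips it with the sorted renameable names.
import Mathlib
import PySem

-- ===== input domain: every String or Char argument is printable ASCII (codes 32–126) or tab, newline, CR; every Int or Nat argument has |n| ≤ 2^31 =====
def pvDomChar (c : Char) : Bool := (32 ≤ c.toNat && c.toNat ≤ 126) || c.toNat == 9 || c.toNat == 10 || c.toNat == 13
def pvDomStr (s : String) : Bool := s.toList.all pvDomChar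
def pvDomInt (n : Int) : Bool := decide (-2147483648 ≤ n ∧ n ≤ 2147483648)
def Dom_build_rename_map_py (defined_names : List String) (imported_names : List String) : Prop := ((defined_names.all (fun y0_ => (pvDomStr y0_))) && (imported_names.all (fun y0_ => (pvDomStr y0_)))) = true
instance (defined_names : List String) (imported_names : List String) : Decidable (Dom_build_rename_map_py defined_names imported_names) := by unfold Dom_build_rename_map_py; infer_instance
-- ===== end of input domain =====

-- B replaces A's per-index base-26 arithmetic and in-place collision-skip loop by a
-- candidate-name stream (all lowercase names by length, then lexicographically) that is
-- filtered against the preserved names and zipped with the sorted renameable names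
-- (objective: idiomatic; same result, no speed claim).

-- ===== PORT A =====
-- _BUILTINS = frozenset(dir(builtins)) | frozenset(keyword.kwlist) | frozenset({...}) as
-- evaluated by CPython 3.11 (a fixed module-level constant; listed sorted, used only for membership)
def pvBuiltins : List String := ["ArithmeticError", "AssertionError", "AttributeError", "BaseException", "BaseExceptionGroup", "BlockingIOError", "BrokenPipeError", "BufferError", "BytesWarning", "ChildProcessError", "ConnectionAbortedError", "ConnectionError", "ConnectionRefusedError", "ConnectionResetError", "DeprecationWarning", "EOFError", "Ellipsis", "EncodingWarning", "EnvironmentError", "Exception", "ExceptionGroup", "False", "FileExistsError", "FileNotFoundError", "FloatingPointError", "FutureWarning", "GeneratorExit", "IOError", "ImportError", "ImportWarning", "IndentationError", "IndexError", "InterruptedError", "IsADirectoryError", "KeyError", "KeyboardInterrupt", "LookupError", "MemoryError", "ModuleNotFoundError", "NameError", "None", "NotADirectoryError", "NotImplemented", "NotImplementedError", "OSError", "OverflowError", "PendingDeprecationWarning", "PermissionError", "ProcessLookupError", "RecursionError", "ReferenceError", "ResourceWarning", "RuntimeError", "RuntimeWarning", "StopAsyncIteration", "StopIteration", "SyntaxError",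 "SyntaxWarning", "SystemError", "SystemExit", "TabError", "TimeoutError", "True", "TypeError", "UnboundLocalError", "UnicodeDecodeError", "UnicodeEncodeError", "UnicodeError", "UnicodeTranslateError", "UnicodeWarning", "UserWarning", "ValueError", "Warning", "ZeroDivisionError", "__all__", "__build_class__", "__debug__", "__doc__", "__file__", "__import__", "__init__", "__loader__", "__main__", "__name__", "__package__", "__spec__", "abs", "aiter", "all", "and", "anext", "any", "as", "ascii", "assert", "async", "await", "bin", "bool", "break", "breakpoint", "bytearray", "bytes", "callable", "chr", "class", "classmethod", "compile", "complex", "continue", "copyright", "credits", "def", "del", "delattr", "dict", "dir", "divmod", "elif", "else", "enumerate", "eval", "except", "exec", "exit", "filter", "finally", "float", "for", "format", "from", "frozenset", "getattr", "global", "globals", "hasattr", "hash", "help", "hex", "id", "if", "import", "in", "input", "int", "is", "isinstance", "issubclass", "iter", "lambda", "len", "license", "list", "locals", "map", "max", "memoryview", "min", "next", "nonlocal", "not", "object", "oct", "open", "or", "ord", "pass", "pow", "print", "property", "quit", "raise", "range", "repr", "return", "reversed", "round", "set", "setattr", "slice", "sorted", "staticmethod", "str", "sum", "super", "try", "tuple",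 "type", "vars", "while", "with", "yield", "zip"]

-- _sequential_name's while-loop, accumulator `result`; it is only called with index ≥ 0
-- (idx is a counter starting at 0), so the index is a Nat. `fuel` is a totality guard only:
-- n // 26 - 1 < n for n ≥ 26, so fuel = n never runs out (pvSeqAux_eq_irrel below); the
-- Python break test `n // 26 - 1 < 0` is exactly `n < 26` on Nat.
def pvSeqAux : Nat → Nat → List Char → List Char
  | 0, n, acc => Char.ofNat (97 + n % 26) :: acc
  | f + 1, n, acc =>
    let acc' := Char.ofNat (97 + n % 26) :: acc
    if n < 26 then acc' else pvSeqAux f (n / 26 - 1) acc'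

def sequential_name_py (index : Nat) : String := String.ofList (pvSeqAux index index [])

-- `new_name in _BUILTINS or new_name in imported_names`
def pvBlockedA (imported : List String) (s : String) : Bool :=
  pvBuiltins.contains s || imported.contains s

-- fuel bound for the collision-skip while-loop; a totality guard only: among any
-- pvFuel+1 consecutive candidate names (all distinct) at most pvFuel are preserved
-- names, so the loop always stops within pvFuel steps (pvSkip_pigeon below)
def pvFuel (imported : List String) : Nat := pvBuiltins.length + imported.length

-- `while new_name in _BUILTINS or new_name in imported_names: idx += 1; new_name = _sequential_name(idx)`
def pvSkip (imported : List String) : Nat → Nat → Nat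
  | 0, idx => idx
  | f + 1, idx =>
    if pvBlockedA imported (sequential_name_py idx) then pvSkip imported f (idx + 1) else idx

-- `for name in sorted(renameable): ... rename_map[name] = new_name; idx += 1`
def pvLoopA (imported : List String) (names : List String) (idx : Nat)
    (d : PySem.Dict String String) : PySem.Dict String String :=
  match names with
  | [] => d
  | name :: rest =>
    let j := pvSkip imported (pvFuel imported) idx
    pvLoopA imported rest (j + 1) (d.insert name (sequential_name_py j))

def build_rename_map_py (defined_names : List String) (imported_names : List String) :
    List (String × String) :=
  let renameable := PySem.Set.diff (PySem.Set.diff (PySem.Set.ofList defined_names) imported_names) pvBuiltins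
  (pvLoopA imported_names (PySem.List.sorted renameable (fun x => x) false) 0 PySem.Dict.empty).items

-- ===== PORT B =====
def pvLetters : List Char :=
  ['a','b','c','d','e','f','g','h','i','j','k','l','m','n','o','p','q','r','s','t','u','v','w','x','y','z']

-- pvGenLen l = all length-l lowercase names in product order (leftmost letter slowest),
-- i.e. itertools.product(ascii_lowercase, repeat=l) with the tuples joined
def pvGenLen : Nat → List (List Char)
  | 0 => [[]]
  | l + 1 => (pvGenLen l).flatMap (fun pre => pvLetters.map (fun c => pre ++ [c]))

-- the length-1 .. length-L blocks of B's candidate generator _candidate_names()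
def pvCandidates (L : Nat) : List String :=
  ((List.range L).flatMap (fun i => pvGenLen (i + 1))).map String.ofList

def build_rename_map_py_alt (defined_names : List String) (imported_names : List String) :
    List (String × String) :=
  let renameable := PySem.List.sorted (PySem.Set.diff (PySem.Set.diff (PySem.Set.ofList defined_names) imported_names) pvBuiltins) (fun x => x) false
  -- finite prefix of B's infinite lazy generator: zip consumes at most renameable.length
  -- surviving candidates, and lengths 1..L supply more than renameable.length +
  -- |_BUILTINS| + |imported| candidates in total (pvValid_of_ge below), hence enough
  let L := Nat.log 26 (renameable.length + pvBuiltins.length + imported_names.length) + 1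
  -- `name not in blocked` with blocked = _BUILTINS | set(imported_names): membership in
  -- the union set is membership in either part
  let valid := (pvCandidates L).filter (fun s => !(pvBuiltins.contains s || imported_names.contains s))
  (PySem.Dict.ofList (renameable.zip valid)).items

-- ===== PRECONDITION & SPEC =====
def Spec_build_rename_map_py (defined_names : List String) (imported_names : List String) (out : List (String × String)) : Prop := out = build_rename_map_py_alt defined_names imported_names
instance (defined_names : List String) (imported_names : List String) (out : List (String × String)) : Decidable (Spec_build_rename_map_py defined_names imported_names out) := by unfold Spec_build_rename_map_py; infer_instance

-- ===== CLAIM (what is proved, stated in full; the proofs are below) =====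
def Claim_equal_build_rename_map_py : Prop := ∀ (defined_names : List String) (imported_names : List String), Dom_build_rename_map_py defined_names imported_names → Spec_build_rename_map_py defined_names imported_names (build_rename_map_py defined_names imported_names)

-- ===== LEMMAS AND PROOFS =====

-- ---- the name generator: pvName n = _sequential_name(n) as a list of chars ----
def pvName (n : Nat) : List Char := pvSeqAux n n []

theorem pvSeqAux_eq_irrel : ∀ n f₁ f₂ acc, n ≤ f₁ → n ≤ f₂ →
    pvSeqAux f₁ n acc = pvSeqAux f₂ n acc := by
  intro n
  induction n using Nat.strong_induction_on with
  | _ n ih =>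
    intro f₁ f₂ acc h₁ h₂
    by_cases h : n < 26
    · cases f₁ <;> cases f₂ <;> simp [pvSeqAux, h]
    · have hdiv := Nat.div_le_self n 26
      cases f₁ with
      | zero => omega
      | succ g₁ =>
        cases f₂ with
        | zero => omega
        | succ g₂ =>
          simp only [pvSeqAux, if_neg h]
          exact ih (n / 26 - 1) (by omega) g₁ g₂ _ (by omega) (by omega)

theorem pvSeqAux_append : ∀ n f acc, n ≤ f → pvSeqAux f n acc = pvSeqAux f n [] ++ acc := by
  intro n
  induction n using Nat.strong_induction_on with
  | _ n ih =>
    intro f acc h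
    by_cases hlt : n < 26
    · cases f <;> simp [pvSeqAux, hlt]
    · have hdiv := Nat.div_le_self n 26
      cases f with
      | zero => omega
      | succ g =>
        simp only [pvSeqAux, if_neg hlt]
        have hm : n / 26 - 1 < n := by omega
        have hg : n / 26 - 1 ≤ g := by omega
        rw [ih _ hm g _ hg, ih _ hm g ([Char.ofNat (97 + n % 26)]) hg]
        simp

theorem pvName_lt {n : Nat} (h : n < 26) : pvName n = [Char.ofNat (97 + n % 26)] := by
  rw [pvName]
  cases n <;> simp [pvSeqAux, h]

theorem pvName_ge {n : Nat} (h : 26 ≤ n) :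
    pvName n = pvName (n / 26 - 1) ++ [Char.ofNat (97 + n % 26)] := by
  have hdiv := Nat.div_le_self n 26
  obtain ⟨g, rfl⟩ : ∃ g, n = g + 1 := ⟨n - 1, by omega⟩
  rw [pvName]
  simp only [pvSeqAux, if_neg (by omega : ¬ g + 1 < 26)]
  rw [pvSeqAux_eq_irrel ((g + 1) / 26 - 1) g ((g + 1) / 26 - 1) _ (by omega) (le_refl _),
      pvSeqAux_append _ _ _ (le_refl _)]
  rfl

theorem pvName_ne_nil (n : Nat) : pvName n ≠ [] := by
  by_cases h : n < 26
  · rw [pvName_lt h]; simp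
  · rw [pvName_ge (by omega)]; simp

theorem pvChar_inj : ∀ m < 26, ∀ n < 26, Char.ofNat (97 + m) = Char.ofNat (97 + n) → m = n := by
  decide

theorem pvName_inj : ∀ m n : Nat, pvName m = pvName n → m = n := by
  intro m
  induction m using Nat.strong_induction_on with
  | _ m ih =>
    intro n h
    by_cases hm : m < 26 <;> by_cases hn : n < 26
    · rw [pvName_lt hm, pvName_lt hn] at h
      have := pvChar_inj (m % 26) (by omega) (n % 26) (by omega) (by simpa using h)
      omega
    · rcases hq : pvName (n / 26 - 1) with _ | ⟨a, l⟩
      · exact absurd hq (pvName_ne_nil _)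
      · rw [pvName_lt hm, pvName_ge (by omega : 26 ≤ n), hq] at h
        have := congrArg List.length h
        simp at this
    · rcases hq : pvName (m / 26 - 1) with _ | ⟨a, l⟩
      · exact absurd hq (pvName_ne_nil _)
      · rw [pvName_ge (by omega : 26 ≤ m), pvName_lt hn, hq] at h
        have := congrArg List.length h
        simp at this
    · rw [pvName_ge (by omega : 26 ≤ m), pvName_ge (by omega : 26 ≤ n)] at h
      obtain ⟨h1, h2⟩ := List.append_inj' h rfl
      have hc : m % 26 = n % 26 := by
        apply pvChar_inj (m % 26) (by omega) (n % 26) (by omega)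
        simpa using h2
      have hdm := Nat.div_le_self m 26
      have hq : m / 26 - 1 = n / 26 - 1 := ih _ (by omega) _ h1
      have e1 := Nat.div_add_mod m 26
      have e2 := Nat.div_add_mod n 26
      have hm1 : 1 ≤ m / 26 := Nat.one_le_div_iff (by omega) |>.mpr (by omega)
      have hn1 : 1 ≤ n / 26 := Nat.one_le_div_iff (by omega) |>.mpr (by omega)
      omega

theorem pvSeq_eq (n : Nat) : sequential_name_py n = String.ofList (pvName n) := rfl

theorem pvSeq_inj : ∀ m n : Nat, sequential_name_py m = sequential_name_py n → m = n := by
  intro m n h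
  rw [pvSeq_eq, pvSeq_eq] at h
  exact pvName_inj m n (String.ofList_inj.mp h)

-- ---- the candidate stream equals the sequential names in order ----
def pvS : Nat → Nat
  | 0 => 0
  | l + 1 => pvS l + 26 ^ (l + 1)

theorem pvS_ident : ∀ l, 25 * pvS l + 26 = 26 ^ (l + 1) := by
  intro l
  induction l with
  | zero => simp [pvS]
  | succ l ih =>
    rw [pvS]
    have : 26 ^ (l + 1 + 1) = 26 * 26 ^ (l + 1) := by rw [pow_succ]; omega
    omega

theorem pvS_succ (l : Nat) : pvS (l + 1) = 26 * (pvS l + 1) := by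
  have := pvS_ident l
  rw [pvS]; omega

theorem pvLetters_eq : pvLetters = (List.range 26).map (fun r => Char.ofNat (97 + r)) := by decide

theorem pvRange_mul_flat {α : Type} (m : Nat) (f : Nat → α) :
    (List.range m).flatMap (fun q => (List.range 26).map (fun r => f (26 * q + r))) =
      (List.range (26 * m)).map f := by
  induction m with
  | zero => simp
  | succ m ih =>
    rw [List.range_succ (n := m), List.flatMap_append, ih,
        show 26 * (m + 1) = 26 * m + 26 by omega, List.range_add (n := 26 * m) (m := 26),
        List.map_append, List.map_map]
    simp [Function.comp]

theorem pvGenLen_block : ∀ l, pvGenLen (l + 1) =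
    (List.range (26 ^ (l + 1))).map (fun j => pvName (pvS l + j)) := by
  intro l
  induction l with
  | zero =>
    show ([([] : List Char)]).flatMap (fun pre => pvLetters.map (fun c => pre ++ [c])) = _
    rw [pvLetters_eq]
    simp only [List.flatMap_cons, List.flatMap_nil, List.append_nil, List.map_map]
    apply List.map_congr_left
    intro j hj
    have hj26 : j < 26 := List.mem_range.mp hj
    simp only [Function.comp_apply, List.nil_append, pvS, Nat.zero_add,
      pvName_lt hj26, Nat.mod_eq_of_lt hj26]
  | succ l ih =>
    show (pvGenLen (l + 1)).flatMap (fun pre => pvLetters.map (fun c => pre ++ [c])) = _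
    rw [ih, pvLetters_eq, List.flatMap_map]
    have step : ∀ j ∈ List.range (26 ^ (l + 1)),
        ((List.range 26).map (fun r => Char.ofNat (97 + r))).map
            (fun c => pvName (pvS l + j) ++ [c]) =
          (List.range 26).map (fun r => pvName (26 * (pvS l + j) + 26 + r)) := by
      intro j hj
      rw [List.map_map]
      apply List.map_congr_left
      intro r hr
      have hr26 : r < 26 := List.mem_range.mp hr
      have h26 : 26 ≤ 26 * (pvS l + j) + 26 + r := by omega
      have hmod : (26 * (pvS l + j) + 26 + r) % 26 = r := by omega
      have hdiv : (26 * (pvS l + j) + 26 + r) / 26 - 1 = pvS l + j := by omega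
      show pvName (pvS l + j) ++ [Char.ofNat (97 + r)] = pvName (26 * (pvS l + j) + 26 + r)
      rw [pvName_ge h26, hmod, hdiv]
    rw [List.flatMap_def, List.map_congr_left step, ← List.flatMap_def]
    have : ∀ j r, 26 * (pvS l + j) + 26 + r = 26 * (pvS l + 1) + (26 * j + r) := by
      intro j r; omega
    calc (List.range (26 ^ (l + 1))).flatMap
            (fun j => (List.range 26).map (fun r => pvName (26 * (pvS l + j) + 26 + r)))
        = (List.range (26 ^ (l + 1))).flatMap
            (fun j => (List.range 26).map (fun r => pvName (26 * (pvS l + 1) + (26 * j + r)))) := by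
          simp only [this]
      _ = (List.range (26 * 26 ^ (l + 1))).map (fun t => pvName (26 * (pvS l + 1) + t)) := by
          have := pvRange_mul_flat (26 ^ (l + 1)) (fun t => pvName (26 * (pvS l + 1) + t))
          simpa using this
      _ = (List.range (26 ^ (l + 1 + 1))).map (fun j => pvName (pvS (l + 1) + j)) := by
          have hp : 26 * 26 ^ (l + 1) = 26 ^ (l + 1 + 1) := (pow_succ' 26 (l + 1)).symm
          rw [pvS_succ, hp]

theorem pvCandidates_eq (L : Nat) :
    pvCandidates L = (List.range (pvS L)).map sequential_name_py := by
  have flat : ∀ L, (List.range L).flatMap (fun i => pvGenLen (i + 1)) =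
      (List.range (pvS L)).map pvName := by
    intro L
    induction L with
    | zero => simp [pvS]
    | succ L ih =>
      rw [List.range_succ (n := L), List.flatMap_append, ih]
      simp only [List.flatMap_cons, List.flatMap_nil, List.append_nil]
      rw [pvGenLen_block, pvS, List.range_add (n := pvS L) (m := 26 ^ (L + 1)),
          List.map_append, List.map_map]
      simp [Function.comp]
  rw [pvCandidates, flat, List.map_map]
  rfl

-- ---- the skip loop finds the first non-preserved name ----
def pvFree (imported : List String) (i : Nat) : Prop :=
  pvBlockedA imported (sequential_name_py i) = false

theorem pvBlocked_mem {imported : List String} {s : String}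
    (h : pvBlockedA imported s = true) : s ∈ pvBuiltins ++ imported := by
  rw [pvBlockedA, Bool.or_eq_true] at h
  rcases h with h | h
  · exact List.mem_append_left _ (by simpa using h)
  · exact List.mem_append_right _ (by simpa using h)

theorem pvSkip_pigeon (imported : List String) (idx : Nat) :
    ∃ k, k ≤ pvFuel imported ∧ pvFree imported (idx + k) := by
  by_contra hc
  rw [not_exists] at hc
  simp only [not_and] at hc
  have hall : ∀ k ≤ pvFuel imported,
      pvBlockedA imported (sequential_name_py (idx + k)) = true := by
    intro k hk
    have := hc k hk
    rw [pvFree] at this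
    simpa using this
  set l := (List.range (pvFuel imported + 1)).map (fun k => sequential_name_py (idx + k)) with hl
  have hnodup : l.Nodup := by
    apply List.Nodup.map _ List.nodup_range
    intro a b hab
    have := pvSeq_inj _ _ hab
    omega
  have hsub : l ⊆ pvBuiltins ++ imported := by
    intro s hs
    rw [hl, List.mem_map] at hs
    obtain ⟨k, hk, rfl⟩ := hs
    have hk' := List.mem_range.mp hk
    exact pvBlocked_mem (hall k (by omega))
  have hle := (List.subperm_of_subset hnodup hsub).length_le
  rw [hl] at hle
  simp [pvFuel] at hle

theorem pvSkip_spec (imported : List String) : ∀ fuel idx,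
    (∃ k, k ≤ fuel ∧ pvFree imported (idx + k)) →
    pvFree imported (pvSkip imported fuel idx) ∧ idx ≤ pvSkip imported fuel idx ∧
      ∀ i, idx ≤ i → i < pvSkip imported fuel idx → ¬ pvFree imported i := by
  intro fuel
  induction fuel with
  | zero =>
    intro idx ⟨k, hk, hfree⟩
    have hk0 : k = 0 := by omega
    subst hk0
    exact ⟨hfree, le_refl _, fun i h1 h2 => absurd h2 (by simp [pvSkip]; omega)⟩
  | succ f ih =>
    intro idx ⟨k, hk, hfree⟩
    by_cases hb : pvBlockedA imported (sequential_name_py idx) = true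
    · have hskip : pvSkip imported (f + 1) idx = pvSkip imported f (idx + 1) := by
        simp [pvSkip, hb]
      have hk0 : k ≠ 0 := by
        intro h; subst h
        rw [pvFree] at hfree
        simp at hfree
        rw [hfree] at hb
        simp at hb
      have hrec := ih (idx + 1) ⟨k - 1, by omega, by
        have : idx + 1 + (k - 1) = idx + k := by omega
        rw [this]; exact hfree⟩
      rw [hskip]
      refine ⟨hrec.1, by omega, ?_⟩
      intro i hi1 hi2
      by_cases hii : i = idx
      · subst hii; rw [pvFree]; simp [hb]
      · exact hrec.2.2 i (by omega) hi2
    · have hskip : pvSkip imported (f + 1) idx = idx := by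
        simp [pvSkip, hb]
      rw [hskip]
      have hfr : pvFree imported idx := by rw [pvFree]; simpa using hb
      exact ⟨hfr, le_refl _, fun i h1 h2 => absurd h2 (by omega)⟩

def pvNxt (imported : List String) (idx : Nat) : Nat := pvSkip imported (pvFuel imported) idx

theorem pvNxt_spec (imported : List String) (idx : Nat) :
    pvFree imported (pvNxt imported idx) ∧ idx ≤ pvNxt imported idx ∧
      ∀ i, idx ≤ i → i < pvNxt imported idx → ¬ pvFree imported i :=
  pvSkip_spec imported (pvFuel imported) idx (pvSkip_pigeon imported idx)

theorem pvNxt_free_self {imported : List String} {idx : Nat} (h : pvFree imported idx) :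
    pvNxt imported idx = idx := by
  rw [pvFree] at h
  have hgen : ∀ fuel, pvSkip imported fuel idx = idx := by
    intro fuel
    cases fuel with
    | zero => rfl
    | succ f => simp [pvSkip, h]
  exact hgen (pvFuel imported)

theorem pvNxt_blocked {imported : List String} {idx : Nat} (h : ¬ pvFree imported idx) :
    pvNxt imported idx = pvNxt imported (idx + 1) := by
  obtain ⟨ha1, ha2, ha3⟩ := pvNxt_spec imported idx
  obtain ⟨hb1, hb2, hb3⟩ := pvNxt_spec imported (idx + 1)
  have hane : pvNxt imported idx ≠ idx := fun he => h (he ▸ ha1)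
  rcases Nat.lt_trichotomy (pvNxt imported idx) (pvNxt imported (idx + 1)) with hlt | heq | hgt
  · exact absurd ha1 (hb3 _ (by omega) hlt)
  · exact heq
  · exact absurd hb1 (ha3 _ (by omega) hgt)

-- the values A assigns: the next n free names starting from index idx
def pvFreeVals (imported : List String) : Nat → Nat → List String
  | _, 0 => []
  | idx, n + 1 =>
    let j := pvNxt imported idx
    sequential_name_py j :: pvFreeVals imported (j + 1) n

theorem pvLoopA_eq (imported : List String) : ∀ (names : List String) (idx : Nat)
    (d : PySem.Dict String String),
    pvLoopA imported names idx d =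
      (names.zip (pvFreeVals imported idx names.length)).foldl
        (fun d p => d.insert p.1 p.2) d := by
  intro names
  induction names with
  | nil => intro idx d; rfl
  | cons name rest ih =>
    intro idx d
    rw [pvLoopA]
    show pvLoopA imported rest (pvNxt imported idx + 1) _ = _
    rw [ih]
    rfl

def pvValidP (imported : List String) (s : String) : Bool :=
  !(pvBuiltins.contains s || imported.contains s)

theorem pvFree_iff (imported : List String) (i : Nat) :
    pvFree imported i ↔ pvValidP imported (sequential_name_py i) = true := by
  rw [pvFree, pvValidP, pvBlockedA]
  simp

theorem pvFreeVals_eq_take (imported : List String) : ∀ (M idx n : Nat),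
    n ≤ (((List.range' idx M).map sequential_name_py).filter (pvValidP imported)).length →
    pvFreeVals imported idx n =
      (((List.range' idx M).map sequential_name_py).filter (pvValidP imported)).take n := by
  intro M
  induction M with
  | zero =>
    intro idx n h
    simp at h
    subst h
    rfl
  | succ M ih =>
    intro idx n h
    rw [List.range'_succ] at *
    by_cases hf : pvFree imported idx
    · have hv : pvValidP imported (sequential_name_py idx) = true := (pvFree_iff _ _).mp hf
      rw [List.map_cons, List.filter_cons_of_pos hv] at h ⊢
      cases n with
      | zero => rfl
      | succ k =>
        rw [pvFreeVals]
        show sequential_name_py (pvNxt imported idx) ::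
            pvFreeVals imported (pvNxt imported idx + 1) k = _
        rw [pvNxt_free_self hf, List.take_succ_cons]
        congr 1
        exact ih (idx + 1) k (by simpa using h)
    · have hv : pvValidP imported (sequential_name_py idx) = false := by
        rw [pvFree_iff] at hf
        simpa using hf
      rw [List.map_cons, List.filter_cons_of_neg (by simp [hv])] at h ⊢
      have hstep : pvFreeVals imported idx n = pvFreeVals imported (idx + 1) n := by
        cases n with
        | zero => rfl
        | succ k =>
          rw [pvFreeVals, pvFreeVals]
          show sequential_name_py (pvNxt imported idx) ::
              pvFreeVals imported (pvNxt imported idx + 1) k =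
            sequential_name_py (pvNxt imported (idx + 1)) ::
              pvFreeVals imported (pvNxt imported (idx + 1) + 1) k
          rw [pvNxt_blocked hf]
      rw [hstep]
      exact ih (idx + 1) n h

theorem pvBlockedCount_le (imported : List String) (K : Nat) :
    (((List.range K).map sequential_name_py).filter
        (fun s => !pvValidP imported s)).length ≤ pvFuel imported := by
  set l := ((List.range K).map sequential_name_py).filter (fun s => !pvValidP imported s) with hl
  have hnodup : l.Nodup := by
    apply List.Nodup.filter
    apply List.Nodup.map _ List.nodup_range
    intro a b hab
    exact pvSeq_inj _ _ hab
  have hsub : l ⊆ pvBuiltins ++ imported := by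
    intro s hs
    rw [hl, List.mem_filter] at hs
    have : pvBlockedA imported s = true := by
      have := hs.2
      rw [pvValidP] at this
      rw [pvBlockedA]
      simpa using this
    exact pvBlocked_mem this
  have := (List.subperm_of_subset hnodup hsub).length_le
  simpa [pvFuel] using this

theorem pvValid_of_ge (imported : List String) (n K : Nat) (h : n + pvFuel imported ≤ K) :
    n ≤ (((List.range K).map sequential_name_py).filter (pvValidP imported)).length := by
  have htotal := (List.length_eq_length_filter_add
    (l := (List.range K).map sequential_name_py) (pvValidP imported)).symm
  have hlen : ((List.range K).map sequential_name_py).length = K := by simp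
  have hblocked := pvBlockedCount_le imported K
  omega

theorem pvZip_take {α β : Type} : ∀ (l : List α) (l' : List β),
    l.zip (l'.take l.length) = l.zip l' := by
  intro l
  induction l with
  | nil => intro l'; rfl
  | cons x xs ih =>
    intro l'
    cases l' with
    | nil => rfl
    | cons y ys => simp [List.zip_cons_cons, ih]

-- ===== VERDICT (by name: the statement is the Claim_ definition above) =====
theorem build_rename_map_py_spec : Claim_equal_build_rename_map_py := by
  intro defined_names imported_names _
  rw [Spec_build_rename_map_py, build_rename_map_py, build_rename_map_py_alt]
  set names := PySem.List.sorted
    (PySem.Set.diff (PySem.Set.diff (PySem.Set.ofList defined_names) imported_names) pvBuiltins)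
    (fun x => x) false with hnames
  rw [pvLoopA_eq]
  have hfilter : (fun s => !(pvBuiltins.contains s || imported_names.contains s)) =
      pvValidP imported_names := rfl
  rw [hfilter]
  set L := Nat.log 26 (names.length + pvBuiltins.length + imported_names.length) + 1 with hLdef
  have hlog : names.length + pvBuiltins.length + imported_names.length < 26 ^ L :=
    Nat.lt_pow_succ_log_self (by norm_num) _
  have hpow : 26 ^ L ≤ pvS L := by rw [hLdef, pvS]; omega
  have hlong : names.length ≤
      (((List.range (pvS L)).map sequential_name_py).filter (pvValidP imported_names)).length :=
    pvValid_of_ge imported_names names.length (pvS L) (by rw [pvFuel] at *; omega)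
  have hvals : pvFreeVals imported_names 0 names.length =
      (((List.range (pvS L)).map sequential_name_py).filter (pvValidP imported_names)).take
        names.length := by
    have := pvFreeVals_eq_take imported_names (pvS L) 0 names.length
      (by rw [← List.range_eq_range']; exact hlong)
    rwa [← List.range_eq_range'] at this
  rw [hvals, pvCandidates_eq, pvZip_take]
  rfl
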